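-- pv_equiv track=rewrite | github.com/aotakataka/thesis | howtofold.py | edges_of_unique_faces
-- ===== SOURCE A (Python) =====
-- def edges_of_unique_faces(faces, edges):
--     faceli = []
--     for i in range(len(edges)):
--         for j in range(len(edges[i])):
--             for k in range(len(faces)):
--                 if edges[i][j][0][0] in faces[k] and edges[i][j][0][1] in faces[k]:
--                     faceli.append(faces[k])
--     # 各面の出現回数をカウント
--     face_count = {}
--     for face in faceli:
--         face_tuple = tuple(sorted(face))  # リストをタプルに変換してソートし、一意にする
--         if face_tuple in face_count:
--             face_count[face_tuple] += 1
--         else: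
--             face_count[face_tuple] = 1
--     # 出現回数が1の面を抽出
--     unique_faces = [list(face) for face, count in face_count.items() if count == 1]
--     edges_of_unique_faces = []
--     for i in range(len(unique_faces)):
--         for j in range(len(unique_faces[i])):
--             for k in range(len(edges)):
--                 for l in range(len(edges[k])):
--                     if unique_faces[i][j-1] in edges[k][l][0] and unique_faces[i][j] in edges[k][l][0]:
--                         edges_of_unique_faces.append(edges[k][l])
--     return edges_of_unique_faces
-- ===== SOURCE B (Python) =====
-- def edges_of_unique_faces(faces, edges):
--     # One pass builds indexes (vertex -> face indices, endpoint pair -> edges,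
--     # endpoint -> edges); lookups replace A's repeated rescans of faces/edges.
--     flat = [e for g in edges for e in g]
--     keys = [tuple(sorted(f)) for f in faces]
--     vert_faces = {}
--     for k, f in enumerate(faces):
--         for v in dict.fromkeys(f):
--             vert_faces.setdefault(v, []).append(k)
--     count = {}
--     for e in flat:
--         a, b = e[0]
--         bset = set(vert_faces.get(b, []))
--         for k in vert_faces.get(a, []):
--             if k in bset:
--                 key = keys[k]
--                 count[key] = count.get(key, 0) + 1
--     by_pair = {}
--     by_vert = {}
--     for e in flat:
--         x, y = e[0]
--         pk = (x, y) if x <= y else (y, x)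
--         by_pair.setdefault(pk, []).append(e)
--         by_vert.setdefault(x, []).append(e)
--         if y != x:
--             by_vert.setdefault(y, []).append(e)
--     out = []
--     for key, c in count.items():
--         if c == 1:
--             uf = list(key)
--             for j in range(len(uf)):
--                 p, q = uf[j - 1], uf[j]
--                 if p == q:
--                     out.extend(by_vert.get(p, []))
--                 else:
--                     pk = (p, q) if p <= q else (q, p)
--                     out.extend(by_pair.get(pk, []))
--     return out
-- ===== Notes on version B (the rewrite author's own statement) =====
-- stated objective: faster
-- what changed: B builds hash indexes once (vertex -> face indices, endpoint pair -> edges, endpoint -> edges) and answers each query by lookup, instead of A's rescanning all faces per edge and all edges per (unique face, side).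
import Mathlib
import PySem

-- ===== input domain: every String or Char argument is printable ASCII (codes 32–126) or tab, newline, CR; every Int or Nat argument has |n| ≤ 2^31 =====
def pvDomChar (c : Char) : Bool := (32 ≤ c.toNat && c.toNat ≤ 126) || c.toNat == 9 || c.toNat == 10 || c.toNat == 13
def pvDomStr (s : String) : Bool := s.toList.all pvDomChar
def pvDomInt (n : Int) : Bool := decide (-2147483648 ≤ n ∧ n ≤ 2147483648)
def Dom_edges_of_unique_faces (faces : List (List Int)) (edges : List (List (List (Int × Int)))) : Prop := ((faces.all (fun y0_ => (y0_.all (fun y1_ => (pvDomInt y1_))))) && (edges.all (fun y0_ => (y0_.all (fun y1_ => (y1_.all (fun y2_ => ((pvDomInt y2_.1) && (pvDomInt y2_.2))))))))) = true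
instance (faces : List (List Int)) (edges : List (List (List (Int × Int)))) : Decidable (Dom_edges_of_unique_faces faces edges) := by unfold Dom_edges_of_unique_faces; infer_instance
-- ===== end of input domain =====

-- B replaces A's repeated rescans of faces/edges by hash indexes built once
-- (vertex → face indices, endpoint pair → edges, endpoint → edges); objective: faster.

-- ===== PORT A =====
-- tuple(sorted(face))
def pvSortKeyA (f : List Int) : List Int := PySem.List.sorted f (fun x => x) false

def edges_of_unique_faces (faces : List (List Int)) (edges : List (List (List (Int × Int)))) : List (List (Int × Int)) :=
  -- for i / for j / for k nested index loops, ported as folds over the same lists in the same order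
  let faceli : List (List Int) :=
    edges.foldl (fun acc g =>
      g.foldl (fun acc e =>
        faces.foldl (fun acc f =>
          if (PySem.List.pyGetD e 0 ((0:Int),(0:Int))).1 ∈ f ∧ (PySem.List.pyGetD e 0 ((0:Int),(0:Int))).2 ∈ f
          then acc ++ [f] else acc) acc) acc) []
  let face_count : PySem.Dict (List Int) Int :=
    faceli.foldl (fun d face =>
      let ft := pvSortKeyA face
      if d.contains ft then d.insert ft (d.getD ft 0 + 1) else d.insert ft 1) PySem.Dict.empty
  let unique_faces : List (List Int) :=
    (face_count.items.filter (fun pc => pc.2 == 1)).map (fun pc => pc.1)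
  unique_faces.foldl (fun acc uf =>
    (PySem.List.pyRange 0 (uf.length : Int) 1).foldl (fun acc j =>
      edges.foldl (fun acc g =>
        g.foldl (fun acc e =>
          let t := PySem.List.pyGetD e 0 ((0:Int),(0:Int))
          if (PySem.List.pyGetD uf (j-1) 0 = t.1 ∨ PySem.List.pyGetD uf (j-1) 0 = t.2) ∧
             (PySem.List.pyGetD uf j 0 = t.1 ∨ PySem.List.pyGetD uf j 0 = t.2)
          then acc ++ [e] else acc) acc) acc) acc) []

-- ===== PORT B =====
def pvNormPair (x y : Int) : Int × Int := if x ≤ y then (x, y) else (y, x)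

-- vert_faces: vertex -> list of indices of faces containing it
def pvVertFacesB (faces : List (List Int)) : PySem.Dict Int (List Int) :=
  (PySem.List.enumerate faces 0).foldl (fun d p =>
    (PySem.List.dedup p.2).foldl (fun d v => d.modify v [] (· ++ [p.1])) d) PySem.Dict.empty

-- count: sorted-face-key -> number of (edge, face) incidences
def pvCountB (faces : List (List Int)) (flat : List (List (Int × Int))) : PySem.Dict (List Int) Int :=
  let keys := faces.map pvSortKeyA
  let vf := pvVertFacesB faces
  flat.foldl (fun d e =>
    let t := PySem.List.pyGetD e 0 ((0:Int),(0:Int))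
    let bset := PySem.Set.ofList (vf.getD t.2 [])
    (vf.getD t.1 []).foldl (fun d k =>
      if PySem.Set.contains bset k then
        d.insert (PySem.List.pyGetD keys k []) (d.getD (PySem.List.pyGetD keys k []) 0 + 1)
      else d) d) PySem.Dict.empty

-- (by_pair, by_vert): endpoint-pair -> edges, endpoint -> edges
def pvIdxB (flat : List (List (Int × Int))) :
    PySem.Dict (Int × Int) (List (List (Int × Int))) × PySem.Dict Int (List (List (Int × Int))) :=
  flat.foldl (fun dd e =>
    (dd.1.modify (pvNormPair (PySem.List.pyGetD e 0 ((0:Int),(0:Int))).1 (PySem.List.pyGetD e 0 ((0:Int),(0:Int))).2) [] (· ++ [e]),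
     (fun d2 =>
        if (PySem.List.pyGetD e 0 ((0:Int),(0:Int))).2 ≠ (PySem.List.pyGetD e 0 ((0:Int),(0:Int))).1
        then d2.modify (PySem.List.pyGetD e 0 ((0:Int),(0:Int))).2 [] (· ++ [e]) else d2)
       (dd.2.modify (PySem.List.pyGetD e 0 ((0:Int),(0:Int))).1 [] (· ++ [e]))))
    (PySem.Dict.empty, PySem.Dict.empty)

def edges_of_unique_faces_alt (faces : List (List Int)) (edges : List (List (List (Int × Int)))) : List (List (Int × Int)) :=
  let flat := edges.flatMap (fun g => g)
  let count := pvCountB faces flat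
  let idx := pvIdxB flat
  count.items.foldl (fun acc pc =>
    if pc.2 == 1 then
      (PySem.List.pyRange 0 (pc.1.length : Int) 1).foldl (fun acc j =>
        let p := PySem.List.pyGetD pc.1 (j-1) 0
        let q := PySem.List.pyGetD pc.1 j 0
        if p = q then acc ++ idx.2.getD p []
        else acc ++ idx.1.getD (pvNormPair p q) []) acc
    else acc) []

-- ===== PRECONDITION & SPEC =====
-- Pre_ excludes exactly the inputs where some edge entry is the empty list, on which
-- Python's edges[i][j][0] raises IndexError (in A and in B alike).
def Pre_edges_of_unique_faces (faces : List (List Int)) (edges : List (List (List (Int × Int)))) : Prop :=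
  ∀ g ∈ edges, ∀ e ∈ g, e ≠ []
instance (faces : List (List Int)) (edges : List (List (List (Int × Int)))) : Decidable (Pre_edges_of_unique_faces faces edges) := by unfold Pre_edges_of_unique_faces; infer_instance

def pvWitness_edges_of_unique_faces : List (List Int) × (List (List (List (Int × Int)))) :=
  ([[1, 2], [2, 3]], [[[(1, 2)]], [[(2, 3)], [(3, 1)]]])

def Spec_edges_of_unique_faces (faces : List (List Int)) (edges : List (List (List (Int × Int)))) (out : List (List (Int × Int))) : Prop := out = edges_of_unique_faces_alt faces edges
instance (faces : List (List Int)) (edges : List (List (List (Int × Int)))) (out : List (List (Int × Int))) : Decidable (Spec_edges_of_unique_faces faces edges out) := by unfold Spec_edges_of_unique_faces; infer_instance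

-- ===== CLAIM (what is proved, stated in full; the proofs are below) =====
def Claim_equal_edges_of_unique_faces : Prop := ∀ (faces : List (List Int)) (edges : List (List (List (Int × Int)))), Dom_edges_of_unique_faces faces edges → Pre_edges_of_unique_faces faces edges → Spec_edges_of_unique_faces faces edges (edges_of_unique_faces faces edges)


-- ===== LEMMAS AND PROOFS =====

-- filtering a duplicate-free Int list for one value
theorem pv_filter_nodup (l : List Int) (hl : l.Nodup) (v : Int) :
    l.filter (fun x => x == v) = if v ∈ l then [v] else [] := by
  induction l with
  | nil => simp
  | cons x t ih =>
    obtain ⟨hx, ht⟩ := List.nodup_cons.mp hl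
    by_cases hxv : x = v
    · subst hxv
      have : t.filter (fun y => y == x) = [] := by
        rw [List.filter_eq_nil_iff]; intro a ha; simp; rintro rfl; exact hx ha
      simp [List.filter_cons, this]
    · have hne : (x == v) = false := by simp [hxv]
      have hvx : ¬ v = x := fun hh => hxv hh.symm
      simp [hne, ih ht, List.mem_cons, hvx]

-- one face's contribution to vert_faces
theorem pv_vf_inner (f : List Int) (k : Int) (d : PySem.Dict Int (List Int)) (v : Int) :
    ((PySem.List.dedup f).foldl (fun d w => d.modify w [] (· ++ [k])) d).getD v []
      = d.getD v [] ++ (if v ∈ f then [k] else []) := by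
  have h1 : (PySem.List.dedup f).foldl (fun d w => d.modify w [] (· ++ [k])) d
      = ((PySem.List.dedup f).map (fun w => (w, k))).foldl (fun d q => d.modify q.1 [] (· ++ [q.2])) d := by
    rw [List.foldl_map]
  rw [h1, PySem.Dict.getD_foldl_modify_append, List.filter_map]
  have h2 : ((fun q : Int × Int => q.1 == v) ∘ fun w => (w, k)) = fun w => w == v := rfl
  rw [h2, pv_filter_nodup _ (PySem.List.nodup_dedup f) v]
  by_cases hv : v ∈ f <;> simp [hv, PySem.List.mem_dedup]

theorem pv_vf_aux (l : List (Int × List Int)) (d : PySem.Dict Int (List Int)) (v : Int) :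
    (l.foldl (fun d p => (PySem.List.dedup p.2).foldl (fun d w => d.modify w [] (· ++ [p.1])) d) d).getD v []
      = d.getD v [] ++ l.flatMap (fun p => if v ∈ p.2 then [p.1] else []) := by
  induction l generalizing d with
  | nil => simp
  | cons p t ih =>
    rw [List.foldl_cons, ih, pv_vf_inner, List.flatMap_cons, List.append_assoc]

theorem pv_vf_getD (faces : List (List Int)) (v : Int) :
    (pvVertFacesB faces).getD v []
      = (PySem.List.enumerate faces 0).flatMap (fun p => if v ∈ p.2 then [p.1] else []) := by
  unfold pvVertFacesB
  rw [pv_vf_aux]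
  simp [PySem.Dict.getD_empty]

theorem pv_vf_mem (faces : List (List Int)) (v k : Int) :
    k ∈ (pvVertFacesB faces).getD v []
      ↔ ∃ (j : Nat) (_ : j < faces.length), k = (j : Int) ∧ v ∈ faces[j] := by
  rw [pv_vf_getD]
  simp only [List.mem_flatMap]
  constructor
  · rintro ⟨p, hp, hk⟩
    rw [PySem.List.mem_enumerate_iff] at hp
    obtain ⟨j, hj, rfl⟩ := hp
    by_cases hv : v ∈ faces[j]
    · simp only [hv, if_pos] at hk
      simp only [List.mem_singleton] at hk
      exact ⟨j, hj, by simpa using hk, hv⟩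
    · simp [hv] at hk
  · rintro ⟨j, hj, rfl, hv⟩
    refine ⟨((j : Int), faces[j]), ?_, ?_⟩
    · rw [PySem.List.mem_enumerate_iff]
      exact ⟨j, hj, by simp⟩
    · simp [hv]

-- B's per-edge counting pass equals A's rescan of faces, folded with the common update
theorem pv_count_inner (faces : List (List Int)) (a b : Int) (d : PySem.Dict (List Int) Int) :
    ((pvVertFacesB faces).getD a []).foldl (fun d k =>
        if PySem.Set.contains (PySem.Set.ofList ((pvVertFacesB faces).getD b [])) k then
          d.insert (PySem.List.pyGetD (faces.map pvSortKeyA) k []) (d.getD (PySem.List.pyGetD (faces.map pvSortKeyA) k []) 0 + 1)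
        else d) d
      = ((faces.filter (fun f => decide (a ∈ f ∧ b ∈ f))).map pvSortKeyA).foldl
          (fun d key => d.insert key (d.getD key 0 + 1)) d := by
  rw [pv_vf_getD faces a]
  rw [List.flatMap_def, List.foldl_flatten, List.foldl_map]
  have hcongr : ∀ (d : PySem.Dict (List Int) Int) (p : Int × List Int), p ∈ PySem.List.enumerate faces 0 →
      (if a ∈ p.2 then [p.1] else []).foldl (fun d k =>
        if PySem.Set.contains (PySem.Set.ofList ((pvVertFacesB faces).getD b [])) k then
          d.insert (PySem.List.pyGetD (faces.map pvSortKeyA) k []) (d.getD (PySem.List.pyGetD (faces.map pvSortKeyA) k []) 0 + 1)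
        else d) d
      = if a ∈ p.2 ∧ b ∈ p.2 then d.insert (pvSortKeyA p.2) (d.getD (pvSortKeyA p.2) 0 + 1) else d := by
    intro d p hp
    rw [PySem.List.mem_enumerate_iff] at hp
    obtain ⟨j, hj, rfl⟩ := hp
    simp only [zero_add]
    by_cases ha : a ∈ faces[j]
    · rw [if_pos ha]
      simp only [List.foldl_cons, List.foldl_nil]
      have hget : PySem.List.pyGetD (faces.map pvSortKeyA) ((j : Nat) : Int) [] = pvSortKeyA faces[j] := by
        rw [PySem.List.pyGetD_natCast]
        rw [List.getD_eq_getElem _ _ (by simpa using hj)]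
        simp
      by_cases hb : b ∈ faces[j]
      · have hmem : ((j : Nat) : Int) ∈ (pvVertFacesB faces).getD b [] := by
          rw [pv_vf_mem]; exact ⟨j, hj, rfl, hb⟩
        have hcont : PySem.Set.contains (PySem.Set.ofList ((pvVertFacesB faces).getD b [])) ((j : Nat) : Int) = true := by
          rw [PySem.Set.contains_iff, PySem.Set.mem_ofList]; exact hmem
        rw [if_pos hcont, hget, if_pos ⟨ha, hb⟩]
      · have hmem : ((j : Nat) : Int) ∉ (pvVertFacesB faces).getD b [] := by
          rw [pv_vf_mem]
          rintro ⟨j', hj', hjj, hb'⟩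
          cases Int.natCast_inj.mp hjj
          exact hb hb'
        have hcont : PySem.Set.contains (PySem.Set.ofList ((pvVertFacesB faces).getD b [])) ((j : Nat) : Int) = false := by
          rw [Bool.eq_false_iff]
          intro hc
          rw [PySem.Set.contains_iff, PySem.Set.mem_ofList] at hc
          exact hmem hc
        rw [hcont]
        simp only [Bool.false_eq_true, if_false]
        rw [if_neg (fun hc => hb hc.2)]
    · rw [if_neg ha]
      simp only [List.foldl_nil]
      rw [if_neg (fun hc => ha hc.1)]
  refine Eq.trans (PySem.List.foldl_congr_mem _ _ _ _ hcongr) ?_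
  have hsnd : (PySem.List.enumerate faces 0).foldl (fun (d : PySem.Dict (List Int) Int) p =>
        if a ∈ p.2 ∧ b ∈ p.2 then d.insert (pvSortKeyA p.2) (d.getD (pvSortKeyA p.2) 0 + 1) else d) d
      = faces.foldl (fun d f =>
        if a ∈ f ∧ b ∈ f then d.insert (pvSortKeyA f) (d.getD (pvSortKeyA f) 0 + 1) else d) d := by
    conv_rhs => rw [← PySem.List.map_snd_enumerate faces 0]
    rw [List.foldl_map]
  rw [hsnd, List.foldl_map, ← PySem.List.foldl_ite_eq_foldl_filter]

-- A's conditional counting update is the unconditional one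
theorem pv_upd_eq (d : PySem.Dict (List Int) Int) (k : List Int) :
    (if d.contains k then d.insert k (d.getD k 0 + 1) else d.insert k 1) = d.insert k (d.getD k 0 + 1) := by
  cases h : d.contains k with
  | true => simp
  | false => simp [PySem.Dict.getD_of_not_contains, h]

-- both counting dicts
theorem pv_count_eq (faces : List (List Int)) (edges : List (List (List (Int × Int)))) :
    (edges.foldl (fun acc g =>
        g.foldl (fun acc e =>
          faces.foldl (fun acc f =>
            if (PySem.List.pyGetD e 0 ((0:Int),(0:Int))).1 ∈ f ∧ (PySem.List.pyGetD e 0 ((0:Int),(0:Int))).2 ∈ f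
            then acc ++ [f] else acc) acc) acc) []).foldl
      (fun d face =>
        if d.contains (pvSortKeyA face) then d.insert (pvSortKeyA face) (d.getD (pvSortKeyA face) 0 + 1)
        else d.insert (pvSortKeyA face) 1) PySem.Dict.empty
      = pvCountB faces (edges.flatMap (fun g => g)) := by
  have hflat : edges.flatMap (fun g => g) = edges.flatten := by simp
  have hfaceli : (edges.foldl (fun acc g =>
        g.foldl (fun acc e =>
          faces.foldl (fun acc f =>
            if (PySem.List.pyGetD e 0 ((0:Int),(0:Int))).1 ∈ f ∧ (PySem.List.pyGetD e 0 ((0:Int),(0:Int))).2 ∈ f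
            then acc ++ [f] else acc) acc) acc) [])
      = edges.flatten.flatMap (fun e => faces.filter (fun f =>
          decide ((PySem.List.pyGetD e 0 ((0:Int),(0:Int))).1 ∈ f ∧ (PySem.List.pyGetD e 0 ((0:Int),(0:Int))).2 ∈ f))) := by
    rw [← List.foldl_flatten]
    simp only [PySem.List.foldl_append_ite_eq_filter]
    rw [PySem.List.foldl_append_eq_flatMap]
    simp
  rw [hfaceli]
  refine Eq.trans (PySem.List.foldl_congr_mem _ _
    (fun d face => d.insert (pvSortKeyA face) (d.getD (pvSortKeyA face) 0 + 1)) _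
    (fun d face _ => pv_upd_eq d (pvSortKeyA face))) ?_
  rw [← List.foldl_map (f := pvSortKeyA) (g := fun (d : PySem.Dict (List Int) Int) k => d.insert k (d.getD k 0 + 1))]
  rw [List.map_flatMap]
  rw [List.flatMap_def, List.foldl_flatten, List.foldl_map]
  unfold pvCountB
  rw [hflat]
  dsimp only
  apply Eq.symm
  apply PySem.List.foldl_congr_mem
  intro d e _
  exact pv_count_inner faces (PySem.List.pyGetD e 0 ((0:Int),(0:Int))).1 (PySem.List.pyGetD e 0 ((0:Int),(0:Int))).2 d

-- by_pair lookup is A's filtered rescan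
theorem pv_bypair_aux (flat : List (List (Int × Int))) (d : PySem.Dict (Int × Int) (List (List (Int × Int)))) (c : Int × Int) :
    (flat.foldl (fun d e => d.modify (pvNormPair (PySem.List.pyGetD e 0 ((0:Int),(0:Int))).1 (PySem.List.pyGetD e 0 ((0:Int),(0:Int))).2) [] (· ++ [e])) d).getD c []
      = d.getD c [] ++ flat.filter (fun e => pvNormPair (PySem.List.pyGetD e 0 ((0:Int),(0:Int))).1 (PySem.List.pyGetD e 0 ((0:Int),(0:Int))).2 == c) := by
  induction flat generalizing d with
  | nil => simp
  | cons e t ih =>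
    rw [List.foldl_cons, ih, List.filter_cons, PySem.Dict.getD_modify]
    by_cases hc : c = pvNormPair (PySem.List.pyGetD e 0 ((0:Int),(0:Int))).1 (PySem.List.pyGetD e 0 ((0:Int),(0:Int))).2
    · simp [hc, List.append_assoc]
    · simp [hc, Ne.symm hc]

theorem pv_byvert_aux (flat : List (List (Int × Int))) (d : PySem.Dict Int (List (List (Int × Int)))) (p : Int) :
    (flat.foldl (fun d e =>
        (fun d2 =>
          if (PySem.List.pyGetD e 0 ((0:Int),(0:Int))).2 ≠ (PySem.List.pyGetD e 0 ((0:Int),(0:Int))).1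
          then d2.modify (PySem.List.pyGetD e 0 ((0:Int),(0:Int))).2 [] (· ++ [e]) else d2)
          (d.modify (PySem.List.pyGetD e 0 ((0:Int),(0:Int))).1 [] (· ++ [e]))) d).getD p []
      = d.getD p [] ++ flat.filter (fun e =>
          p == (PySem.List.pyGetD e 0 ((0:Int),(0:Int))).1 || p == (PySem.List.pyGetD e 0 ((0:Int),(0:Int))).2) := by
  induction flat generalizing d with
  | nil => simp
  | cons e t ih =>
    rw [List.foldl_cons, ih, List.filter_cons]
    simp only []
    by_cases hyx : (PySem.List.pyGetD e 0 ((0:Int),(0:Int))).2 ≠ (PySem.List.pyGetD e 0 ((0:Int),(0:Int))).1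
    · rw [if_pos hyx]
      simp only [PySem.Dict.getD_modify]
      by_cases hpx : p = (PySem.List.pyGetD e 0 ((0:Int),(0:Int))).1 <;>
        by_cases hpy : p = (PySem.List.pyGetD e 0 ((0:Int),(0:Int))).2
      · exact absurd (hpy.symm.trans hpx) hyx
      · simp [hpx, hpy, hyx, Ne.symm hyx, List.append_assoc]
      · simp [hpx, hpy, hyx, Ne.symm hyx, List.append_assoc]
      · simp [hpx, hpy]
    · rw [if_neg hyx]
      rw [not_ne_iff] at hyx
      simp only [PySem.Dict.getD_modify]
      by_cases hpx : p = (PySem.List.pyGetD e 0 ((0:Int),(0:Int))).1 <;>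
        simp [hpx, hyx, List.append_assoc]

theorem pv_idx_split (flat : List (List (Int × Int))) :
    pvIdxB flat =
      (flat.foldl (fun d e => d.modify (pvNormPair (PySem.List.pyGetD e 0 ((0:Int),(0:Int))).1 (PySem.List.pyGetD e 0 ((0:Int),(0:Int))).2) [] (· ++ [e])) PySem.Dict.empty,
       flat.foldl (fun d e =>
        (fun d2 =>
          if (PySem.List.pyGetD e 0 ((0:Int),(0:Int))).2 ≠ (PySem.List.pyGetD e 0 ((0:Int),(0:Int))).1
          then d2.modify (PySem.List.pyGetD e 0 ((0:Int),(0:Int))).2 [] (· ++ [e]) else d2)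
          (d.modify (PySem.List.pyGetD e 0 ((0:Int),(0:Int))).1 [] (· ++ [e]))) PySem.Dict.empty) := by
  unfold pvIdxB
  rw [PySem.List.foldl_prod_mk
    (f := fun (d1 : PySem.Dict (Int × Int) (List (List (Int × Int)))) (e : List (Int × Int)) =>
      d1.modify (pvNormPair (PySem.List.pyGetD e 0 ((0:Int),(0:Int))).1 (PySem.List.pyGetD e 0 ((0:Int),(0:Int))).2) [] (· ++ [e]))
    (g := fun (d2 : PySem.Dict Int (List (List (Int × Int)))) (e : List (Int × Int)) =>
      (fun d3 =>
        if (PySem.List.pyGetD e 0 ((0:Int),(0:Int))).2 ≠ (PySem.List.pyGetD e 0 ((0:Int),(0:Int))).1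
        then d3.modify (PySem.List.pyGetD e 0 ((0:Int),(0:Int))).2 [] (· ++ [e]) else d3)
        (d2.modify (PySem.List.pyGetD e 0 ((0:Int),(0:Int))).1 [] (· ++ [e])))]

-- p != q: both endpoints matched iff the normalized endpoint pairs coincide
theorem pv_cond_pair (p q x y : Int) (h : p ≠ q) :
    ((p = x ∨ p = y) ∧ (q = x ∨ q = y)) ↔ pvNormPair x y = pvNormPair p q := by
  unfold pvNormPair
  split_ifs <;> simp [Prod.ext_iff] <;> omega

-- per (face key, position) step: A's rescan of all edges equals B's index lookup
theorem pv_lookup_eq (flat : List (List (Int × Int))) (p q : Int) :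
    flat.filter (fun e =>
        decide ((p = (PySem.List.pyGetD e 0 ((0:Int),(0:Int))).1 ∨ p = (PySem.List.pyGetD e 0 ((0:Int),(0:Int))).2) ∧
                (q = (PySem.List.pyGetD e 0 ((0:Int),(0:Int))).1 ∨ q = (PySem.List.pyGetD e 0 ((0:Int),(0:Int))).2)))
      = (if p = q then (pvIdxB flat).2.getD p [] else (pvIdxB flat).1.getD (pvNormPair p q) []) := by
  rw [pv_idx_split]
  by_cases hpq : p = q
  · subst hpq
    rw [if_pos rfl]
    dsimp only
    rw [pv_byvert_aux]
    simp only [PySem.Dict.getD_empty, List.nil_append]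
    apply List.filter_congr
    intro e _
    by_cases h1 : p = (PySem.List.pyGetD e 0 ((0:Int),(0:Int))).1 <;>
      by_cases h2 : p = (PySem.List.pyGetD e 0 ((0:Int),(0:Int))).2 <;>
      simp [h1, h2]
  · rw [if_neg hpq]
    dsimp only
    rw [pv_bypair_aux]
    simp only [PySem.Dict.getD_empty, List.nil_append]
    apply List.filter_congr
    intro e _
    rw [Bool.eq_iff_iff]
    simp only [decide_eq_true_eq, beq_iff_eq]
    exact pv_cond_pair p q _ _ hpq


theorem edges_of_unique_faces_eq (faces : List (List Int)) (edges : List (List (List (Int × Int)))) :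
    edges_of_unique_faces faces edges = edges_of_unique_faces_alt faces edges := by
  unfold edges_of_unique_faces edges_of_unique_faces_alt
  dsimp only
  rw [pv_count_eq]
  rw [List.foldl_map]
  rw [← PySem.List.foldl_if_eq_foldl_filter]
  apply PySem.List.foldl_congr_mem
  intro acc pc _
  by_cases h : (pc.2 == 1) = true
  · simp only [h, if_true]
    apply PySem.List.foldl_congr_mem
    intro acc2 j _
    rw [← List.foldl_flatten, PySem.List.foldl_append_ite_eq_filter]
    have hfl : (edges.flatten : List (List (Int × Int))) = edges.flatMap (fun g => g) := by simp
    rw [hfl, pv_lookup_eq]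
    by_cases hc : PySem.List.pyGetD pc.1 (j - 1) 0 = PySem.List.pyGetD pc.1 j 0
    · rw [if_pos hc, if_pos hc]
    · rw [if_neg hc, if_neg hc]
  · simp only [Bool.not_eq_true] at h
    simp only [h, Bool.false_eq_true, if_false]

-- ===== VERDICT (by name: the statement is the Claim_ definition above) =====
theorem edges_of_unique_faces_spec : Claim_equal_edges_of_unique_faces := by
  intro faces edges _ _
  unfold Spec_edges_of_unique_faces
  exact edges_of_unique_faces_eq faces edges
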